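-- pv_equiv track=rewrite | github.com/serverx-org/contests-solutions | ECP-week-3/02_no_consecutive_bits.py | max_value_no_consecutive_bits
-- ===== SOURCE A (Python) =====
-- def max_value_no_consecutive_bits(n):
--     # Convert n to binary string
--     binary_str = bin(n)[2:]
--
--     # Convert binary string to list of integers
--     bits = list(map(int, binary_str))
--
--     # Iterate through bits to make sure no three consecutive bits are set
--     for i in range(2, len(bits)):
--         if bits[i] == 1 and bits[i-1] == 1 and bits[i-2] == 1:
--             bits[i] = 0  # Change the third consecutive bit to 0
--
--     # Convert modified list of bits back to integer
--     new_value = int(''.join(map(str, bits)), 2)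
--
--     return new_value
-- ===== SOURCE B (Python) =====
-- def max_value_no_consecutive_bits(n):
--     # Split the binary string into maximal runs of 1s; rebuild each run from the
--     # periodic pattern '110' by string repetition and slicing, then rejoin on '0'.
--     runs = bin(n)[2:].split('0')
--     return int('0'.join(('110' * len(run))[:len(run)] for run in runs), 2)
-- ===== Notes on version B (the rewrite author's own statement) =====
-- stated objective: alternative
-- what changed: instead of any per-bit scan with lookback, B splits the binary string on '0' into maximal runs of 1s and rebuilds each run as a slice of the repeated periodic pattern '110', rejoining on '0'
import Mathlib
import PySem

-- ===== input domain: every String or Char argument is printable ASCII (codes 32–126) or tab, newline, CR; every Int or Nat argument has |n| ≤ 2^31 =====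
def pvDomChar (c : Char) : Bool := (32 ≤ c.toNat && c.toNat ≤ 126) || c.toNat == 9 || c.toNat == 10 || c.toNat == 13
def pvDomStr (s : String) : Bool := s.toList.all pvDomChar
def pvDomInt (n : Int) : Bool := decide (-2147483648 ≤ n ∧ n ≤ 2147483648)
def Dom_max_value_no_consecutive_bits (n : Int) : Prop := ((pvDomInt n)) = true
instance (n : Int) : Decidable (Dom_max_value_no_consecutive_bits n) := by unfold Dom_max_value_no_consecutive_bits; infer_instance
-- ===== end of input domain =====

-- B replaces A's per-bit lookback scan mutating the bit list by splitting the binary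
-- string on '0' into maximal runs of 1s and rebuilding each run as a slice of the
-- repeated pattern '110' (objective: alternative); the return values agree on all nonnegative inputs.

-- shared digit extraction: bin(n)[2:] as a list of 0/1 ints, for n ≥ 0 (MSB first)
def natBits (m : Nat) : List Int :=
  match m with
  | 0 => []
  | k + 1 => natBits ((k + 1) / 2) ++ [(((k + 1) % 2 : Nat) : Int)]
decreasing_by exact Nat.div_lt_self (Nat.succ_pos k) one_lt_two

def intBits (n : Int) : List Int := if n = 0 then [0] else natBits n.toNat

-- int(s, 2): base-2 left fold over 0/1 digits (exact for 0/1 digits)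
def bitsToInt (bs : List Int) : Int := bs.foldl (fun acc b => 2 * acc + b) 0

-- ===== PORT A =====
-- body of A's for-loop over i in range(2, len(bits)); indices are nonnegative, ported over Nat
def aStep (bs : List Int) (i : Nat) : List Int :=
  if bs.getD i 0 = 1 ∧ bs.getD (i - 1) 0 = 1 ∧ bs.getD (i - 2) 0 = 1 then bs.set i 0 else bs

def max_value_no_consecutive_bits (n : Int) : Int :=
  let bits := intBits n
  let bits2 := (List.range' 2 (bits.length - 2)).foldl aStep bits
  bitsToInt bits2

-- ===== PORT B =====
-- ('110' * len(run))[:len(run)]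
def bRun (r : List Char) : List Char :=
  ((List.replicate r.length ['1', '1', '0']).flatten).take r.length

-- hand port of str.split('0') (keeps empty pieces, exact on these digit strings)
def splitZero : List Char → List (List Char)
  | [] => [[]]
  | c :: rest =>
    match splitZero rest with
    | [] => [[]]          -- unreachable: splitZero never returns []
    | h :: t => if c = '0' then [] :: h :: t else (c :: h) :: t

-- hand port of '0'.join(...)
def joinZero : List (List Char) → List Char
  | [] => []
  | [r] => r
  | r :: rest => r ++ '0' :: joinZero rest

def max_value_no_consecutive_bits_alt (n : Int) : Int :=
  let s := (intBits n).map (fun b => if b = 1 then '1' else '0')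
  let joined := joinZero ((splitZero s).map bRun)
  joined.foldl (fun acc c => 2 * acc + (if c = '1' then 1 else 0)) 0

-- ===== PRECONDITION & SPEC =====
-- Pre_ excludes n < 0, where A raises ValueError (bin(n)[2:] keeps the 'b' of '-0b…')
def Pre_max_value_no_consecutive_bits (n : Int) : Prop := 0 ≤ n
instance (n : Int) : Decidable (Pre_max_value_no_consecutive_bits n) := by
  unfold Pre_max_value_no_consecutive_bits; infer_instance

def pvWitness_max_value_no_consecutive_bits : Int := (23)

def Spec_max_value_no_consecutive_bits (n : Int) (out : Int) : Prop := out = max_value_no_consecutive_bits_alt n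
instance (n : Int) (out : Int) : Decidable (Spec_max_value_no_consecutive_bits n out) := by unfold Spec_max_value_no_consecutive_bits; infer_instance

-- ===== CLAIM =====
def Claim_equal_max_value_no_consecutive_bits : Prop := ∀ (n : Int), Dom_max_value_no_consecutive_bits n → Pre_max_value_no_consecutive_bits n → Spec_max_value_no_consecutive_bits n (max_value_no_consecutive_bits n)

-- ===== LEMMAS AND PROOFS =====

-- A's loop as a structural pass: p2/p1 are the two previously produced digits
def aGo : List Int → Int → Int → List Int
  | [], _, _ => []
  | b :: rest, p2, p1 =>
    if b = 1 ∧ p1 = 1 ∧ p2 = 1 then 0 :: aGo rest p1 0 else b :: aGo rest p1 b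

-- run-counter pass over ints (proof intermediate)
def bGo : List Int → Int → List Int
  | [], _ => []
  | b :: rest, c =>
    if b = 1 then (if c + 1 = 3 then 0 :: bGo rest 0 else 1 :: bGo rest (c + 1))
    else 0 :: bGo rest 0

-- run-counter pass over chars (proof intermediate)
def cGo : List Char → Nat → List Char
  | [], _ => []
  | ch :: rest, c =>
    if ch = '1' then (if c + 1 = 3 then '0' :: cGo rest 0 else '1' :: cGo rest (c + 1))
    else '0' :: cGo rest 0

-- the '110'-periodic mask of a run, built from an arbitrary phase c
def maskFrom : Nat → Nat → List Char
  | _, 0 => []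
  | c, k + 1 => if c + 1 = 3 then '0' :: maskFrom 0 k else '1' :: maskFrom (c + 1) k

-- tail of joinZero after the first run
def jTail : List (List Char) → List Char
  | [] => []
  | h :: t => '0' :: (bRun h ++ jTail t)

theorem aGo_eq_bGo (bits : List Int) (hb : ∀ b ∈ bits, b = 0 ∨ b = 1) :
    ∀ (c p2 p1 : Int), 0 ≤ c → c ≤ 2 → (p1 = 1 ↔ 1 ≤ c) → (p1 = 1 ∧ p2 = 1 ↔ 2 ≤ c) →
    aGo bits p2 p1 = bGo bits c := by
  induction bits with
  | nil => intro _ _ _ _ _ _ _; rfl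
  | cons b rest ih =>
    intro c p2 p1 hc0 hc2 h1 h2
    have hbr : ∀ x ∈ rest, x = 0 ∨ x = 1 := fun x hx => hb x (List.mem_cons_of_mem _ hx)
    rcases hb b List.mem_cons_self with hb0 | hb1
    · subst hb0
      simp only [aGo, bGo]
      rw [if_neg (by simp), if_neg (by norm_num)]
      rw [ih hbr 0 p1 0 le_rfl (by norm_num) (by norm_num) (by norm_num)]
    · subst hb1
      simp only [aGo, bGo, true_and, if_true]
      by_cases hc : c + 1 = 3
      · rw [if_pos (h2.mpr (by omega)), if_pos hc]
        rw [ih hbr 0 p1 0 le_rfl (by norm_num) (by omega) (by omega)]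
      · have hp : ¬(p1 = 1 ∧ p2 = 1) := fun h => hc (by have := h2.mp h; omega)
        rw [if_neg hp, if_neg hc]
        rw [ih hbr (c + 1) p1 1 (by omega) (by omega) (by omega) ?_]
        constructor
        · rintro ⟨-, hp1⟩; have := h1.mp hp1; omega
        · intro h; exact ⟨rfl, h1.mpr (by omega)⟩

theorem aFold_eq_aGo : ∀ (rest done : List Int), 2 ≤ done.length →
    (List.range' done.length rest.length).foldl aStep (done ++ rest) =
      done ++ aGo rest (done.getD (done.length - 2) 0) (done.getD (done.length - 1) 0) := by
  intro rest
  induction rest with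
  | nil => intro done h; simp [aGo]
  | cons b rest ih =>
    intro done h
    rw [List.length_cons, List.range'_succ, List.foldl_cons]
    have hgi : (done ++ b :: rest).getD done.length 0 = b := by
      simp [List.getD_eq_getElem?_getD]
    have hg1 : (done ++ b :: rest).getD (done.length - 1) 0 = done.getD (done.length - 1) 0 := by
      simp [List.getD_eq_getElem?_getD,
        List.getElem?_append_left (show done.length - 1 < done.length by omega)]
    have hg2 : (done ++ b :: rest).getD (done.length - 2) 0 = done.getD (done.length - 2) 0 := by
      simp [List.getD_eq_getElem?_getD,
        List.getElem?_append_left (show done.length - 2 < done.length by omega)]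
    by_cases hcond : b = 1 ∧ done.getD (done.length - 1) 0 = 1 ∧ done.getD (done.length - 2) 0 = 1
    · have hset : aStep (done ++ b :: rest) done.length = (done ++ [0]) ++ rest := by
        unfold aStep
        rw [if_pos (by rw [hgi, hg1, hg2]; exact hcond)]
        rw [List.set_append_right _ _ le_rfl]; simp
      rw [hset]
      have hlen : (done ++ [0]).length = done.length + 1 := by simp
      have hih := ih (done ++ [0]) (by simp; omega)
      rw [hlen] at hih
      rw [hih]
      have e1 : (done ++ [0]).getD (done.length + 1 - 1) 0 = 0 := by
        simp [List.getD_eq_getElem?_getD]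
      have e2 : (done ++ [0]).getD (done.length + 1 - 2) 0 = done.getD (done.length - 1) 0 := by
        have : done.length + 1 - 2 = done.length - 1 := by omega
        rw [this]
        rw [List.getD_eq_getElem?_getD, List.getD_eq_getElem?_getD,
          List.getElem?_append_left (show done.length - 1 < done.length by omega)]
      rw [e1, e2, List.append_assoc]
      show _ = done ++ aGo (b :: rest) _ _
      rw [aGo, if_pos hcond]
      simp
    · have hkeep : aStep (done ++ b :: rest) done.length = (done ++ [b]) ++ rest := by
        unfold aStep
        rw [if_neg (by rw [hgi, hg1, hg2]; exact hcond)]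
        simp
      rw [hkeep]
      have hlen : (done ++ [b]).length = done.length + 1 := by simp
      have hih := ih (done ++ [b]) (by simp; omega)
      rw [hlen] at hih
      rw [hih]
      have e1 : (done ++ [b]).getD (done.length + 1 - 1) 0 = b := by
        simp [List.getD_eq_getElem?_getD]
      have e2 : (done ++ [b]).getD (done.length + 1 - 2) 0 = done.getD (done.length - 1) 0 := by
        have : done.length + 1 - 2 = done.length - 1 := by omega
        rw [this]
        rw [List.getD_eq_getElem?_getD, List.getD_eq_getElem?_getD,
          List.getElem?_append_left (show done.length - 1 < done.length by omega)]
      rw [e1, e2, List.append_assoc]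
      show _ = done ++ aGo (b :: rest) _ _
      rw [aGo, if_neg hcond]
      simp

theorem natBits_mem : ∀ (m : Nat), ∀ b ∈ natBits m, b = 0 ∨ b = 1 := by
  intro m
  induction m using Nat.strong_induction_on with
  | _ m ih =>
    match m with
    | 0 => intro b hb; simp [natBits] at hb
    | k + 1 =>
      intro b hb
      rw [natBits] at hb
      rcases List.mem_append.mp hb with h | h
      · exact ih ((k + 1) / 2) (Nat.div_lt_self (Nat.succ_pos k) one_lt_two) b h
      · simp at h
        subst h
        omega

theorem intBits_mem (n : Int) : ∀ b ∈ intBits n, b = 0 ∨ b = 1 := by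
  unfold intBits
  split
  · intro b hb; simp at hb; left; exact hb
  · exact natBits_mem n.toNat

theorem bGo_cons2 (b0 b1 : Int) (rest : List Int)
    (h0 : b0 = 0 ∨ b0 = 1) (h1 : b1 = 0 ∨ b1 = 1) :
    bGo (b0 :: b1 :: rest) 0 =
      b0 :: b1 :: bGo rest (if b1 = 1 then (if b0 = 1 then 2 else 1) else 0) := by
  rcases h0 with h0 | h0 <;> rcases h1 with h1 | h1 <;> subst h0 <;> subst h1 <;>
    simp [bGo]

-- A's fold computes the run-counter pass
theorem loops_agree (bits : List Int) (hb : ∀ b ∈ bits, b = 0 ∨ b = 1) :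
    (List.range' 2 (bits.length - 2)).foldl aStep bits = bGo bits 0 := by
  match bits with
  | [] => rfl
  | [b] =>
    rcases hb b (by simp) with h | h <;> subst h <;> simp [bGo]
  | b0 :: b1 :: rest =>
    have h0 := hb b0 (by simp)
    have h1 := hb b1 (by simp)
    have hrest : ∀ b ∈ rest, b = 0 ∨ b = 1 := fun b h => hb b (by simp [h])
    have hlen : (b0 :: b1 :: rest).length - 2 = rest.length := by simp
    have hdone : ([b0, b1] : List Int).length = 2 := rfl
    have hA := aFold_eq_aGo rest [b0, b1] (by simp)
    simp only [hdone] at hA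
    rw [hlen]
    show (List.range' 2 rest.length).foldl aStep ([b0, b1] ++ rest) = _
    rw [hA, bGo_cons2 b0 b1 rest h0 h1]
    show ([b0, b1] : List Int) ++ _ = ([b0, b1] : List Int) ++ _
    congr 1
    rcases h0 with h0 | h0 <;> rcases h1 with h1 | h1 <;> subst h0 <;> subst h1
    · simpa using aGo_eq_bGo rest hrest 0 0 0 (by norm_num) (by norm_num) (by norm_num) (by norm_num)
    · simpa using aGo_eq_bGo rest hrest 1 0 1 (by norm_num) (by norm_num) (by norm_num) (by norm_num)
    · simpa using aGo_eq_bGo rest hrest 0 1 0 (by norm_num) (by norm_num) (by norm_num) (by norm_num)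
    · simpa using aGo_eq_bGo rest hrest 2 1 1 (by norm_num) (by norm_num) (by norm_num) (by norm_num)

theorem splitZero_cons (c : Char) (rest h' : List Char) (t' : List (List Char))
    (hsp : splitZero rest = h' :: t') :
    splitZero (c :: rest) = if c = '0' then [] :: h' :: t' else (c :: h') :: t' := by
  unfold splitZero
  rw [hsp]

theorem splitZero_ne_nil (s : List Char) : splitZero s ≠ [] := by
  match s with
  | [] => simp [splitZero]
  | c :: rest =>
    match h : splitZero rest with
    | [] => exact absurd h (splitZero_ne_nil rest)
    | h' :: t' =>
      rw [splitZero_cons c rest h' t' h]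
      by_cases hc : c = '0' <;> simp [hc]

theorem joinZero_map (h : List Char) (t : List (List Char)) :
    joinZero ((h :: t).map bRun) = bRun h ++ jTail t := by
  induction t generalizing h with
  | nil => simp [joinZero, jTail]
  | cons h2 t2 ih =>
    show joinZero (bRun h :: bRun h2 :: t2.map bRun) = _
    rw [show joinZero (bRun h :: bRun h2 :: t2.map bRun)
          = bRun h ++ '0' :: joinZero (bRun h2 :: t2.map bRun) from rfl, jTail]
    have := ih h2
    simp only [List.map_cons] at this
    rw [this]

theorem mask_take (m k : Nat) (hk : k ≤ 3 * m) :
    ((List.replicate m (['1', '1', '0'] : List Char)).flatten).take k = maskFrom 0 k := by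
  induction m generalizing k with
  | zero => interval_cases k; rfl
  | succ m ih =>
    match k with
    | 0 => rfl
    | 1 => simp [List.replicate_succ, maskFrom]
    | 2 => simp [List.replicate_succ, maskFrom]
    | (k' + 3) =>
      rw [List.replicate_succ, List.flatten_cons]
      show List.take (k' + 3) ('1' :: '1' :: '0' :: _) = _
      rw [show maskFrom 0 (k' + 3) = '1' :: '1' :: '0' :: maskFrom 0 k' by
        simp [maskFrom]]
      simp only [List.take_succ_cons]
      show ('1' : Char) :: '1' :: '0' ::
          List.take k' (List.replicate m (['1', '1', '0'] : List Char)).flatten = _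
      rw [ih k' (by omega)]

theorem bRun_eq_maskFrom (r : List Char) : bRun r = maskFrom 0 r.length := by
  unfold bRun
  exact mask_take r.length r.length (by omega)

-- the split-and-mask construction equals the run-counter pass, at any phase
theorem split_eq_cGo (s : List Char) :
    ∀ (c : Nat) (h : List Char) (t : List (List Char)),
    (∀ x ∈ s, x = '0' ∨ x = '1') → splitZero s = h :: t →
    maskFrom c h.length ++ jTail t = cGo s c := by
  induction s with
  | nil =>
    intro c h t _ hsp
    simp [splitZero] at hsp
    obtain ⟨rfl, rfl⟩ := hsp
    rfl
  | cons ch rest ih =>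
    intro c h t hs hsp
    have hrest : ∀ x ∈ rest, x = '0' ∨ x = '1' := fun x hx => hs x (List.mem_cons_of_mem _ hx)
    obtain ⟨h', t', hsp'⟩ : ∃ h' t', splitZero rest = h' :: t' := by
      match hx : splitZero rest with
      | [] => exact absurd hx (splitZero_ne_nil rest)
      | a :: b => exact ⟨a, b, rfl⟩
    rcases hs ch List.mem_cons_self with h0 | h1
    · subst h0
      rw [splitZero_cons _ _ _ _ hsp', if_pos rfl] at hsp
      obtain ⟨rfl, rfl⟩ := by exact List.cons.inj hsp
      show maskFrom c 0 ++ jTail (h' :: t') = cGo ('0' :: rest) c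
      rw [cGo, if_neg (by decide)]
      show '0' :: (bRun h' ++ jTail t') = '0' :: cGo rest 0
      rw [bRun_eq_maskFrom, ih 0 h' t' hrest hsp']
    · subst h1
      rw [splitZero_cons _ _ _ _ hsp', if_neg (by decide)] at hsp
      obtain ⟨rfl, rfl⟩ := by exact List.cons.inj hsp
      show maskFrom c ('1' :: h').length ++ jTail t' = cGo ('1' :: rest) c
      rw [List.length_cons, cGo, if_pos rfl, maskFrom]
      by_cases hc : c + 1 = 3
      · rw [if_pos hc, if_pos hc, List.cons_append, ih 0 h' t' hrest hsp']
      · rw [if_neg hc, if_neg hc, List.cons_append, ih (c + 1) h' t' hrest hsp']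

-- mapping int digits to chars commutes with the run-counter pass
theorem cGo_map (bits : List Int) : ∀ (cn : Nat),
    (∀ b ∈ bits, b = 0 ∨ b = 1) →
    cGo (bits.map (fun b => if b = 1 then '1' else '0')) cn =
      (bGo bits (cn : Int)).map (fun b => if b = 1 then '1' else '0') := by
  induction bits with
  | nil => intro _ _; rfl
  | cons b rest ih =>
    intro cn hb
    have hrest : ∀ x ∈ rest, x = 0 ∨ x = 1 := fun x hx => hb x (List.mem_cons_of_mem _ hx)
    rcases hb b List.mem_cons_self with h0 | h1
    · subst h0
      show cGo ('0' :: _) cn = _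
      rw [cGo, if_neg (by decide), bGo, if_neg (by norm_num)]
      show _ = '0' :: _
      exact congrArg (List.cons '0') (by simpa using ih 0 hrest)
    · subst h1
      show cGo ('1' :: _) cn = _
      rw [cGo, if_pos rfl, bGo, if_pos rfl]
      by_cases hc : cn + 1 = 3
      · rw [if_pos hc, if_pos (by exact_mod_cast congrArg (Nat.cast : Nat → Int) hc)]
        show '0' :: _ = '0' :: _
        exact congrArg (List.cons '0') (by simpa using ih 0 hrest)
      · rw [if_neg hc, if_neg (by intro h; exact hc (by exact_mod_cast h))]
        show '1' :: _ = '1' :: _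
        have h2 := ih (cn + 1) hrest
        push_cast at h2
        exact congrArg (List.cons '1') h2

theorem bGo_mem (bits : List Int) : ∀ (c : Int), ∀ x ∈ bGo bits c, x = 0 ∨ x = 1 := by
  induction bits with
  | nil => intro c x hx; simp [bGo] at hx
  | cons b rest ih =>
    intro c x hx
    rw [bGo] at hx
    split at hx
    · split at hx <;> rcases List.mem_cons.mp hx with h | h
      · omega
      · exact ih 0 x h
      · omega
      · exact ih _ x h
    · rcases List.mem_cons.mp hx with h | h
      · omega
      · exact ih 0 x h

theorem parse_map (xs : List Int) : ∀ (acc : Int), (∀ b ∈ xs, b = 0 ∨ b = 1) →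
    (xs.map (fun b => if b = 1 then '1' else '0')).foldl
        (fun acc c => 2 * acc + (if c = '1' then 1 else 0)) acc =
      xs.foldl (fun acc b => 2 * acc + b) acc := by
  induction xs with
  | nil => intro _ _; rfl
  | cons b rest ih =>
    intro acc hb
    have hrest : ∀ x ∈ rest, x = 0 ∨ x = 1 := fun x hx => hb x (List.mem_cons_of_mem _ hx)
    rcases hb b List.mem_cons_self with h0 | h1
    · subst h0
      simp only [List.map_cons, List.foldl_cons]
      rw [if_neg (by norm_num : ¬ (0 : Int) = 1), if_neg (by decide : ¬ ('0' : Char) = '1'),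
        ih _ hrest]
    · subst h1
      have e : ((1 : Int) :: rest).map (fun b => if b = 1 then '1' else '0')
          = '1' :: rest.map (fun b => if b = 1 then '1' else '0') := by norm_num
      rw [e, List.foldl_cons, List.foldl_cons, if_pos rfl, ih _ hrest]

-- ===== VERDICT =====
theorem max_value_no_consecutive_bits_spec : Claim_equal_max_value_no_consecutive_bits := by
  intro n _ _
  unfold Spec_max_value_no_consecutive_bits
  unfold max_value_no_consecutive_bits max_value_no_consecutive_bits_alt
  simp only []
  rw [loops_agree (intBits n) (intBits_mem n)]
  obtain ⟨h, t, hsp⟩ : ∃ h t,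
      splitZero ((intBits n).map (fun b => if b = 1 then '1' else '0')) = h :: t := by
    match hx : splitZero ((intBits n).map (fun b => if b = 1 then '1' else '0')) with
    | [] => exact absurd hx (splitZero_ne_nil _)
    | a :: b => exact ⟨a, b, rfl⟩
  rw [hsp, joinZero_map, bRun_eq_maskFrom,
    split_eq_cGo _ 0 h t (by
      intro x hx
      rcases List.mem_map.mp hx with ⟨b, _, rfl⟩
      by_cases hb : b = 1 <;> simp [hb]) hsp,
    cGo_map (intBits n) 0 (intBits_mem n)]
  rw [show ((0 : Nat) : Int) = 0 by norm_num]
  exact (parse_map (bGo (intBits n) 0) 0 (bGo_mem (intBits n) 0)).symm
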